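-- pv_equiv track=rewrite | github.com/KHobden/Google-Challenges | escape_the_building.py | solution
-- ===== SOURCE A (Python) =====
-- from itertools import permutations as perm
--
-- def floyd_warshall(times):
--     """
--     (list of lists of ints) -> list of lists of ints
--
--     Floyd-Warshall algorithm
--     Look for a shorter path to connect two nodes e.g.
--     1->2 may be replaced with 1->3->2 if the weight of the new path is lower
--     Updating the weights allows us to move to the next node via the most efficient path
--     This algorithm also finds any negative cycles whereby we could gain infite time and rescue all the bunnies
--     """
--
--     #For each edge, loop through all possible new edges and update the weights
--     num_nodes = len(times)
--     for start_node in range(num_nodes):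
--         for middle_node in range(num_nodes):
--             for end_node in range(num_nodes):
--                 if times[start_node][end_node] > times[start_node][middle_node] + times[middle_node][end_node]:
--                     times[start_node][end_node] = times[start_node][middle_node] + times[middle_node][end_node]
--
--     #If a negative cycle is found, we can return to the same point in negative time
--     #We show a negative cycle has been found by returning False
--     for node in range(num_nodes):
--         if times[node][node] < 0:
--             return False
--
--     return times
--
-- def solution(times, time_limit):
--     """
--     (list of lists of ints, int) -> list of ints
--
--     Find the number of bunnies that can be saved
--     Run the Floyd-Warshall algorithm
--     If a negative cycle is found, all bunnies can be saved
--     Permute through the bunny cells to find possible paths through the prison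
--     Compute the weight of each path
--     If the total time taken to rescue the bunnies is less than the allowed time, return the list of bunnies
--     """
--
--     #Run Floyd-Warshall to search for a negative cycle. If found, all bunnies can escape
--     num_buns = len(times) - 2
--     times = floyd_warshall(times)
--     if not times:
--         return [bun for bun in range(num_buns)]
--
--     #Consider all possible orders that we can collect the bunnies
--     for path_length in reversed(range(1, num_buns+1)):
--         for collection_order in perm(range(1, num_buns+1), path_length):
--
--             #Generate a list of the edges that will need to be taken to attain the bunnies
--             path = [bun for bun in collection_order]
--             path.insert(0, 0)
--             path.append(num_buns+1)
--             edges = list(zip(path, path[1:]))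
--
--             #Sum the weights of these edges
--             total_time = 0
--             for start, end in edges:
--                 total_time += times[start][end]
--
--             #If we can complete our rescue in the time limit, return the sorted numbers of the saved bunnies
--             if total_time <= time_limit:
--                 return sorted([bun_room-1 for bun_room in collection_order])
--
--     #If no bunnies could be saved, return an empty list
--     return []
-- ===== SOURCE B (Python) =====
-- def solution(times, time_limit):
--     # Unlike A, this does not mutate the input matrix in place.
--     n = len(times)
--     d = [row[:] for row in times]
--     # Same relaxation pass as A (loop order preserved so the matrices coincide).
--     for i in range(n):
--         for k in range(n):
--             for j in range(n):
--                 if d[i][j] > d[i][k] + d[k][j]: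
--                     d[i][j] = d[i][k] + d[k][j]
--
--     num_buns = n - 2
--     if any(d[v][v] < 0 for v in range(n)):
--         return list(range(num_buns))
--
--     exit_node = num_buns + 1
--
--     def dfs(cur, cost, remaining, r):
--         """First (in lexicographic pick order) length-r order of elements of
--         `remaining` that can still reach the exit within the budget; the cost of
--         the shared prefix is accumulated once instead of re-summed per order."""
--         if r == 0:
--             return [] if cost + d[cur][exit_node] <= time_limit else None
--         for idx in range(len(remaining)):
--             nxt = remaining[idx]
--             sub = dfs(nxt, cost + d[cur][nxt], remaining[:idx] + remaining[idx + 1:], r - 1)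
--             if sub is not None:
--                 return [nxt] + sub
--         return None
--
--     for k in range(num_buns, 0, -1):
--         found = dfs(0, 0, list(range(1, num_buns + 1)), k)
--         if found is not None:
--             return sorted(b - 1 for b in found)
--     return []
-- ===== Notes on version B (the rewrite author's own statement) =====
-- stated objective: alternative
-- what changed: The permutation search (materialise every permutation, rebuild the path, zip and re-sum its edges) is replaced by a recursive depth-first search that accumulates the cost of each shared prefix once and short-circuits on the first feasible order; the Floyd-Warshall relaxation pass is kept, and B does not mutate the input matrix in place.
import Mathlib
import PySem

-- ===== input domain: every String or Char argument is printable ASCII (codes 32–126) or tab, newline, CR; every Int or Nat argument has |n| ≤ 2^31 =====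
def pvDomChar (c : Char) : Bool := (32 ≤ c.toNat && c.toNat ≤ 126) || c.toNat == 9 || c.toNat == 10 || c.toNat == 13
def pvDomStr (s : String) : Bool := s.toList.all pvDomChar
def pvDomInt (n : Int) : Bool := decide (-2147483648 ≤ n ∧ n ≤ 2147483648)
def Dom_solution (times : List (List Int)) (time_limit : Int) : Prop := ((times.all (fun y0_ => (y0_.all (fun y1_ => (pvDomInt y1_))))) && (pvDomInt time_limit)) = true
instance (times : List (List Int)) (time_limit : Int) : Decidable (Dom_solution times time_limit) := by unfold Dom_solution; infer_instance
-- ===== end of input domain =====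

-- B replaces A's per-permutation path building (insert/zip/sum over every generated
-- permutation) by a recursive depth-first search that accumulates the cost of each
-- shared prefix once; note Python A mutates `times` in place (Floyd-Warshall), B does
-- not — the equivalence proved here is about the return value.

-- shared matrix-access primitives (the Python expression times[a][b] / times[i][j] = v)
def mGet (m : List (List Int)) (a b : Int) : Int := (m.getD a.toNat []).getD b.toNat 0

def mSet (m : List (List Int)) (i j : Nat) (v : Int) : List (List Int) :=
  m.set i ((m.getD i []).set j v)

-- ===== PORT A =====
-- the triple relaxation loop of floyd_warshall (loop order start, middle, end as in A)
def relaxA (m0 : List (List Int)) (n : Nat) : List (List Int) :=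
  (List.range n).foldl (fun m (i : Nat) =>
    (List.range n).foldl (fun m (k : Nat) =>
      (List.range n).foldl (fun m (j : Nat) =>
        if mGet m i j > mGet m i k + mGet m k j
        then mSet m i j (mGet m i k + mGet m k j) else m) m) m) m0

-- floyd_warshall: none = the Python return value False (a negative cycle was found)
def floydA (times : List (List Int)) : Option (List (List Int)) :=
  let n := times.length
  let m := relaxA times n
  if (List.range n).any (fun v => mGet m v v < 0) then none else some m

-- total_time: sum of the weights of the zipped edge list
def pathTimeA (m : List (List Int)) (path : List Int) : Int :=
  (path.zip path.tail).foldl (fun acc e => acc + mGet m e.1 e.2) 0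

def solution (times : List (List Int)) (time_limit : Int) : List Int :=
  let numBuns : Int := (times.length : Int) - 2
  match floydA times with
  | none => PySem.List.pyRange 0 numBuns 1
  | some m =>
    if m.isEmpty then PySem.List.pyRange 0 numBuns 1   -- `if not times` is also true on []
    else
      (((PySem.List.pyRange 1 (numBuns + 1) 1).reverse).findSome? (fun k =>
        ((PySem.List.permutations (PySem.List.pyRange 1 (numBuns + 1) 1) k.toNat).find?
            (fun p => pathTimeA m ((0 :: p) ++ [numBuns + 1]) ≤ time_limit)).map
          (fun p => PySem.List.sorted (p.map (fun b => b - 1)) (fun x => x) false))).getD []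

-- ===== PORT B =====
-- same relaxation pass as A (Source B copies the matrix first; copying is the identity here)
def relaxB (m0 : List (List Int)) (n : Nat) : List (List Int) :=
  (List.range n).foldl (fun m (i : Nat) =>
    (List.range n).foldl (fun m (k : Nat) =>
      (List.range n).foldl (fun m (j : Nat) =>
        if mGet m i j > mGet m i k + mGet m k j
        then mSet m i j (mGet m i k + mGet m k j) else m) m) m) m0

-- first length-r pick order from `remaining` that reaches the exit within budget;
-- the prefix cost is carried in `cost`
def dfsB (m : List (List Int)) (tl exitN : Int) :
    Nat → Int → Int → List Int → Option (List Int)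
  | 0, cur, cost, _ =>
      if cost + mGet m cur exitN ≤ tl then some [] else none
  | r + 1, cur, cost, remaining =>
      (List.range remaining.length).findSome? (fun i =>
        let nxt := remaining.getD i 0
        (dfsB m tl exitN r nxt (cost + mGet m cur nxt) (remaining.eraseIdx i)).map
          (fun sub => nxt :: sub))

def solution_alt (times : List (List Int)) (time_limit : Int) : List Int :=
  let n := times.length
  let d := relaxB times n
  let numBuns : Int := (n : Int) - 2
  if (List.range n).any (fun v => mGet d v v < 0) then PySem.List.pyRange 0 numBuns 1
  else
    ((PySem.List.pyRange numBuns 0 (-1)).findSome? (fun k =>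
      (dfsB d time_limit (numBuns + 1) k.toNat 0 0 (PySem.List.pyRange 1 (numBuns + 1) 1)).map
        (fun p => PySem.List.sorted (p.map (fun b => b - 1)) (fun x => x) false))).getD []

-- ===== PRECONDITION & SPEC =====
-- Pre_ excludes exactly the ragged matrices on which Python A raises IndexError
-- (a row shorter than the number of rows); it is the full set of inputs A returns on.
def Pre_solution (times : List (List Int)) (time_limit : Int) : Prop :=
  ∀ row ∈ times, times.length ≤ row.length
instance (times : List (List Int)) (time_limit : Int) : Decidable (Pre_solution times time_limit) := by unfold Pre_solution; infer_instance

def pvWitness_solution : List (List Int) × Int :=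
  ([[0, 2, 2, 2], [9, 0, 2, 2], [9, 2, 0, 2], [9, 2, 2, 0]], 5)

def Spec_solution (times : List (List Int)) (time_limit : Int) (out : List Int) : Prop := out = solution_alt times time_limit
instance (times : List (List Int)) (time_limit : Int) (out : List Int) : Decidable (Spec_solution times time_limit out) := by unfold Spec_solution; infer_instance

-- ===== CLAIM (what is proved, stated in full; the proofs are below) =====
def Claim_equal_solution : Prop := ∀ (times : List (List Int)) (time_limit : Int), Dom_solution times time_limit → Pre_solution times time_limit → Spec_solution times time_limit (solution times time_limit)

-- ===== LEMMAS AND PROOFS =====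

-- cost of the path cur → p… → exit on matrix m
def pcost (m : List (List Int)) (e : Int) : Int → List Int → Int
  | cur, [] => mGet m cur e
  | cur, x :: xs => mGet m cur x + pcost m e x xs

theorem relaxB_eq : relaxB = relaxA := rfl

theorem findSome?_congr_mem {α β : Type} (l : List α) (f g : α → Option β)
    (h : ∀ a ∈ l, f a = g a) : l.findSome? f = l.findSome? g := by
  induction l with
  | nil => rfl
  | cons a l ih =>
    simp only [List.findSome?_cons, h a (by simp)]
    cases g a with
    | none => exact ih (fun a ha => h a (by simp [ha]))
    | some b => rfl

theorem find?_flatMap {α β : Type} (l : List β) (f : β → List α) (p : α → Bool) :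
    (l.flatMap f).find? p = l.findSome? (fun b => (f b).find? p) := by
  induction l with
  | nil => rfl
  | cons a l ih =>
    simp only [List.flatMap_cons, List.find?_append, List.findSome?_cons, ih]
    cases (f a).find? p <;> simp [Option.or]

theorem pathTime_foldl (m : List (List Int)) (e : Int) :
    ∀ (p : List Int) (cur acc : Int),
      (((cur :: (p ++ [e])).zip (p ++ [e])).foldl (fun acc x => acc + mGet m x.1 x.2) acc)
        = acc + pcost m e cur p := by
  intro p
  induction p with
  | nil => intro cur acc; simp [pcost]
  | cons x xs ih =>
    intro cur acc
    simp only [List.cons_append, List.zip_cons_cons, List.foldl_cons]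
    rw [ih x (acc + mGet m cur x)]
    simp [pcost]; ring

theorem dfsB_eq_find? (m : List (List Int)) (tl e : Int) :
    ∀ (r : Nat) (rem : List Int) (cur cost : Int),
      dfsB m tl e r cur cost rem
        = (PySem.List.permutations rem r).find?
            (fun p => decide (cost + pcost m e cur p ≤ tl)) := by
  intro r
  induction r with
  | zero =>
    intro rem cur cost
    simp only [dfsB, PySem.List.permutations, List.find?]
    by_cases h : cost + mGet m cur e ≤ tl <;> simp [pcost, h]
  | succ r ih =>
    intro rem cur cost
    simp only [dfsB, PySem.List.permutations]
    rw [find?_flatMap]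
    apply findSome?_congr_mem
    intro i hi
    have hilt : i < rem.length := List.mem_range.mp hi
    have hget : rem[i]? = some rem[i] := List.getElem?_eq_getElem hilt
    have hgetD : rem.getD i 0 = rem[i] := by
      simp [List.getD, hget]
    simp only [hget, hgetD]
    rw [ih]
    rw [List.find?_map]
    have hp : (fun p => decide (cost + mGet m cur rem[i] + pcost m e rem[i] p ≤ tl))
        = ((fun p => decide (cost + pcost m e cur p ≤ tl)) ∘ fun sub => rem[i] :: sub) := by
      funext p
      simp only [Function.comp, pcost]
      exact decide_eq_decide.mpr (by omega)
    rw [hp]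

theorem foldl_length {β : Type} (g : List (List Int) → β → List (List Int))
    (h : ∀ m b, (g m b).length = m.length) :
    ∀ (l : List β) (m : List (List Int)), (l.foldl g m).length = m.length := by
  intro l
  induction l with
  | nil => intro m; rfl
  | cons b l ih => intro m; rw [List.foldl_cons, ih, h]

theorem relaxA_length (m0 : List (List Int)) (n : Nat) : (relaxA m0 n).length = m0.length := by
  unfold relaxA
  apply foldl_length _ ?_ ; intro m i
  apply foldl_length _ ?_ ; intro m k
  apply foldl_length _ ?_ ; intro m j
  by_cases h : mGet m i j > mGet m i k + mGet m k j <;> simp [mSet, h]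

theorem solution_spec : Claim_equal_solution := by
  intro times tl _ _
  unfold Spec_solution solution solution_alt floydA
  rw [relaxB_eq]
  by_cases hneg : (List.range times.length).any
      (fun v => mGet (relaxA times times.length) v v < 0)
  · simp [hneg]
  · simp only [hneg, Bool.false_eq_true, if_false]
    by_cases hempty : times = []
    · subst hempty
      simp [PySem.List.pyRange_one_eq_nil (by norm_num : (-2:Int) ≤ 0),
            PySem.List.pyRange_neg_one_eq_nil (by norm_num : (-2:Int) ≤ 0)]
    · have hne : (relaxA times times.length).isEmpty = false := by
        rw [List.isEmpty_eq_false_iff, ← List.length_pos_iff, relaxA_length]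
        exact List.length_pos_of_ne_nil hempty
      simp only [hne, Bool.false_eq_true, if_false]
      rw [PySem.List.pyRange_neg_one_eq_reverse]
      norm_num
      congr 1
      apply findSome?_congr_mem
      intro k _
      rw [dfsB_eq_find?]
      congr 1
      congr 1
      funext p
      simp only [pathTimeA, List.tail_cons]
      exact decide_eq_decide.mpr (by
        rw [pathTime_foldl (relaxA times times.length) ((times.length:Int) - 2 + 1) p 0 0])
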